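-- pv_equiv track=rewrite | github.com/hwan1753/algorithm | N으로 표현.py | solution
-- ===== SOURCE A (Python) =====
-- def solution(N, number):
--     answer = 1
--     arr = [set() for x in range(8)]
--
--     if N == number:
--         return answer
--
--     for i in range(1,9):
--         arr[i-1].add(int(str(N) * i))
--
--     for i in range(1,8):
--         for j in range(i):
--             for num1 in arr[j]:
--                 for num2 in arr[i - j - 1]:
--                     arr[i].add(num1 + num2)
--                     arr[i].add(num1 - num2)
--                     arr[i].add(num1 * num2)
--                     if num2 != 0:
--                         arr[i].add(num1 // num2)
--         if number in arr[i]: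
--             answer = i + 1
--             return answer
--
--
--     return -1
-- ===== SOURCE B (Python) =====
-- def solution(N, number):
--     cache = {}
--
--     def reachable(count):
--         if count in cache:
--             return cache[count]
--         vals = {int(str(N) * count)}
--         for j in range(1, count):
--             left = reachable(j)
--             right = reachable(count - j)
--             for a in left:
--                 for b in right:
--                     vals.add(a + b)
--                     vals.add(a - b)
--                     vals.add(a * b)
--                     if b != 0:
--                         vals.add(a // b)
--         cache[count] = vals
--         return vals
--
--     for count in range(1, 9):
--         if number in reachable(count):
--             return count
--     return -1
-- ===== Notes on version B (the rewrite author's own statement) =====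
-- stated objective: alternative
-- what changed: Replaces the bottom-up 8-slot array DP (prefilled concatenation singletons, triple nested loop mutating arr[i] in place, plus an N==number special case) by a memoized top-down recursion reachable(count) over split sizes, searched by a plain ascending loop over count 1..8 whose count=1 step subsumes the special case.
import Mathlib
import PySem

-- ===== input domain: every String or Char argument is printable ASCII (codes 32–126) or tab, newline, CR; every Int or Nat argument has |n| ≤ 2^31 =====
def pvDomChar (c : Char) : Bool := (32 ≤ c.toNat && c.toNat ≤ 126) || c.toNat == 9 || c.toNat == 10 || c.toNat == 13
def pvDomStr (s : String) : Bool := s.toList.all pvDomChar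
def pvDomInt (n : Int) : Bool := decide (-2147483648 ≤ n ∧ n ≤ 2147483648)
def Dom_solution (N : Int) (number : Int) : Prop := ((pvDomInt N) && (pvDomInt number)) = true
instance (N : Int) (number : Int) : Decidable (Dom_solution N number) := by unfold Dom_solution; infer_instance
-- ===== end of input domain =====

-- B re-implements A's bottom-up 8-slot array DP as a top-down recursion over split
-- sizes searched by an ascending loop; equivalence of the RETURN value is proved on
-- Pre_ (A raises ValueError on N < 0 with N ≠ number, which Pre_ excludes).

-- ===== PORT A =====

-- int(str(N) * i): shared by both ports (the same expression occurs in both Pythons).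
-- `.getD 0` is never reached on Pre_: for N ≥ 0 the parse succeeds, and for N < 0
-- (where Python raises ValueError for i ≥ 2) Pre_ admits only N = number, on which
-- both programs return before any i ≥ 2 concatenation (i = 1 parses fine).
def pvConcat (N : Int) (i : Nat) : Int :=
  (PySem.Int.ofChars? (List.flatten (List.replicate i (PySem.Int.toChars N)))).getD 0

-- the four .add lines of the innermost loop body (identical source lines in A and B)
def pvCombine (s : PySem.Set Int) (a b : Int) : PySem.Set Int :=
  let s1 := PySem.Set.add s (a + b)
  let s2 := PySem.Set.add s1 (a - b)
  let s3 := PySem.Set.add s2 (a * b)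
  if b ≠ 0 then PySem.Set.add s3 (PySem.Int.floordiv a b) else s3

-- the body of `for j in range(i): for num1 in arr[j]: for num2 in arr[i-j-1]: …`
def solInner (arr : List (PySem.Set Int)) (i : Nat) : PySem.Set Int :=
  (List.range i).foldl (fun s j =>
    (arr.getD j []).foldl (fun s a =>
      (arr.getD (i - j - 1) []).foldl (fun s b => pvCombine s a b) s) s)
    (arr.getD i [])

-- `for i in range(1, 8): … if number in arr[i]: return i + 1`, with the in-place
-- mutation of arr[i] modelled by List.set (the inner loops only read arr[j], j < i)
def solLoop (number : Int) (arr : List (PySem.Set Int)) (i : Nat) : Int :=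
  if i < 8 then
    let s := solInner arr i
    if number ∈ s then (i : Int) + 1
    else solLoop number (arr.set i s) (i + 1)
  else -1
  termination_by 8 - i

def solution (N : Int) (number : Int) : Int :=
  let answer : Int := 1
  if N == number then answer
  else
    -- arr = [set() for x in range(8)]; for i in range(1, 9): arr[i-1].add(int(str(N)*i))
    let arr0 : List (PySem.Set Int) := List.replicate 8 []
    let arr1 := (PySem.List.pyRange 1 9 1).foldl
      (fun arr i => arr.set (i - 1).toNat
        (PySem.Set.add (arr.getD (i - 1).toNat []) (pvConcat N i.toNat))) arr0
    solLoop number arr1 1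

-- ===== PORT B =====

-- reachable(count): base {int(str(N)*count)}, then for j in range(1, count) the
-- pairwise combinations of reachable(j) and reachable(count-j); the Python memo
-- cache is an evaluation shortcut and does not change the computed set
def reachB (N : Int) (count : Nat) : PySem.Set Int :=
  (List.range (count - 1)).attach.foldl
    (fun s j =>
      let left := reachB N (j.1 + 1)
      let right := reachB N (count - (j.1 + 1))
      left.foldl (fun s a => right.foldl (fun s b => pvCombine s a b) s) s)
    (PySem.Set.add [] (pvConcat N count))
  termination_by count
  decreasing_by
  · have := List.mem_range.mp j.2; omega
  · have := List.mem_range.mp j.2; omega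

-- for count in range(1, 9): if number in reachable(count): return count / return -1
def altLoop (N : Int) (number : Int) (count : Nat) : Int :=
  if count < 9 then
    if number ∈ reachB N count then (count : Int) else altLoop N number (count + 1)
  else -1
  termination_by 9 - count

def solution_alt (N : Int) (number : Int) : Int := altLoop N number 1

-- ===== PRECONDITION & SPEC =====
-- Pre_ excludes exactly the inputs where A raises: for N < 0 with N ≠ number,
-- int(str(N) * i) with i ≥ 2 raises ValueError (e.g. int("-5-5")).
def Pre_solution (N : Int) (number : Int) : Prop := 0 ≤ N ∨ N = number
instance (N : Int) (number : Int) : Decidable (Pre_solution N number) := by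
  unfold Pre_solution; infer_instance

def pvWitness_solution : Int × Int := (2, 10)

def Spec_solution (N : Int) (number : Int) (out : Int) : Prop := out = solution_alt N number
instance (N : Int) (number : Int) (out : Int) : Decidable (Spec_solution N number out) := by
  unfold Spec_solution; infer_instance

-- ===== CLAIM (what is proved, stated in full; the proofs are below) =====
def Claim_equal_solution : Prop := ∀ (N : Int) (number : Int), Dom_solution N number → Pre_solution N number → Spec_solution N number (solution N number)

-- ===== LEMMAS AND PROOFS =====

-- clone of the private parser helper inside PySem.Int.ofChars?
def myGo : List Char → Bool → Nat → Option Nat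
  | [], afterDigit, acc => if afterDigit then some acc else none
  | c :: rest, afterDigit, acc =>
    if c.isDigit then myGo rest true (acc * 10 + (c.toNat - '0'.toNat))
    else
      if c = '_' ∧ afterDigit = true then
        match rest with
        | d :: _ => if d.isDigit then myGo rest false acc else none
        | [] => none
      else none

def myDigitsVal? : List Char → Option Nat
  | [] => none
  | cs => myGo cs false 0

def myOfChars? (s : List Char) : Option Int :=
  have cs := (List.dropWhile PySem.Int.isIntSpace (List.dropWhile PySem.Int.isIntSpace s).reverse).reverse
  match cs with
  | '-' :: ds => Option.map (fun n => -n) (do let a ← myDigitsVal? ds; pure (a : Int))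
  | '+' :: ds => Option.map (fun n => n) (do let a ← myDigitsVal? ds; pure (a : Int))
  | ds => Option.map (fun n => n) (do let a ← myDigitsVal? ds; pure (a : Int))

theorem ofChars?_eq_clone (s : List Char) : PySem.Int.ofChars? s = myOfChars? s := by
  unfold PySem.Int.ofChars? myOfChars?
  generalize (List.dropWhile PySem.Int.isIntSpace (List.dropWhile PySem.Int.isIntSpace s).reverse).reverse = cs
  rcases cs with _ | ⟨c, ds⟩
  · rfl
  · by_cases h1 : c = '-'
    · subst h1
      conv_lhs => whnf
      conv_rhs => whnf
      congr 1
      congr 1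
      ·
        rcases ds with _ | ⟨c0, rest⟩
        · rfl
        · conv_lhs => whnf
          conv_rhs => whnf
          cases instDecidableEqBool c0.isDigit true with
          | isTrue hd =>
            conv_lhs => whnf
            conv_rhs => whnf
            generalize (0 * 10 + (c0.toNat - '0'.toNat)) = acc
            generalize (true : Bool) = b
            induction rest generalizing b acc with
            | nil => rfl
            | cons c1 rest1 ih =>
              conv_lhs => whnf
              conv_rhs => whnf
              simp only [ih]
              rfl
          | isFalse hd =>
            cases instDecidableEqChar c0 '_' with
            | isTrue hu => rfl
            | isFalse hu => rfl
    · by_cases h2 : c = '+'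
      · subst h2
        conv_lhs => whnf
        conv_rhs => whnf
        congr 1
        congr 1
        rcases ds with _ | ⟨c0, rest⟩
        · rfl
        · conv_lhs => whnf
          conv_rhs => whnf
          cases instDecidableEqBool c0.isDigit true with
          | isTrue hd =>
            conv_lhs => whnf
            conv_rhs => whnf
            generalize (0 * 10 + (c0.toNat - '0'.toNat)) = acc
            generalize (true : Bool) = b
            induction rest generalizing b acc with
            | nil => rfl
            | cons c1 rest1 ih =>
              conv_lhs => whnf
              conv_rhs => whnf
              simp only [ih]
              rfl
          | isFalse hd =>
            cases instDecidableEqChar c0 '_' with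
            | isTrue hu => rfl
            | isFalse hu => rfl
      · conv_lhs => whnf
        conv_rhs => whnf
        split
        all_goals try (exfalso; simp_all; done)
        split
        all_goals try (exfalso; simp_all; done)
        congr 1
        congr 1
        generalize (c :: ds : List Char) = l
        rcases l with _ | ⟨c0, rest⟩
        · rfl
        · conv_lhs => whnf
          conv_rhs => whnf
          cases instDecidableEqBool c0.isDigit true with
          | isTrue hd =>
            conv_lhs => whnf
            conv_rhs => whnf
            generalize (0 * 10 + (c0.toNat - '0'.toNat)) = acc
            generalize (true : Bool) = b
            induction rest generalizing b acc with
            | nil => rfl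
            | cons c1 rest1 ih =>
              conv_lhs => whnf
              conv_rhs => whnf
              simp only [ih]
              rfl
          | isFalse hd =>
            cases instDecidableEqChar c0 '_' with
            | isTrue hu => rfl
            | isFalse hu => rfl

def myVal (acc : Nat) (ds : List Char) : Nat :=
  ds.foldl (fun a c => a * 10 + (c.toNat - '0'.toNat)) acc

theorem myGo_digits (ds : List Char) (b : Bool) (acc : Nat)
    (h : ∀ c ∈ ds, c.isDigit = true) (hne : ds ≠ [] ∨ b = true) :
    myGo ds b acc = some (myVal acc ds) := by
  induction ds generalizing b acc with
  | nil =>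
    rcases hne with hne | hne
    · exact absurd rfl hne
    · subst hne; simp [myGo, myVal]
  | cons c rest ih =>
    have hc : c.isDigit = true := h c List.mem_cons_self
    simp only [myGo, hc, if_true]
    rw [ih (b := true) (acc := acc * 10 + (c.toNat - '0'.toNat)) (fun d hd => h d (List.mem_cons_of_mem _ hd)) (Or.inr rfl)]
    rfl

theorem dropWhile_false_all {p : Char → Bool} (l : List Char)
    (h : ∀ c ∈ l, p c = false) : l.dropWhile p = l := by
  cases l with
  | nil => rfl
  | cons c rest => simp [h c List.mem_cons_self]

def decDigits (n : Nat) : List Char :=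
  if n < 10 then [Nat.digitChar n] else decDigits (n / 10) ++ [Nat.digitChar (n % 10)]
  termination_by n
  decreasing_by exact Nat.div_lt_self (by omega) (by omega)

theorem digitChar_isDigit (k : Nat) (h : k < 10) : (Nat.digitChar k).isDigit = true := by
  interval_cases k <;> decide

theorem digitChar_val (k : Nat) (h : k < 10) : (Nat.digitChar k).toNat - '0'.toNat = k := by
  interval_cases k <;> decide

theorem decDigits_digits (n : Nat) : ∀ c ∈ decDigits n, c.isDigit = true := by
  induction n using decDigits.induct with
  | case1 n h => intro c hc; rw [decDigits, if_pos h] at hc; simp at hc; subst hc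
                 exact digitChar_isDigit n h
  | case2 n h ih =>
    intro c hc; rw [decDigits, if_neg h] at hc
    rcases List.mem_append.mp hc with hc | hc
    · exact ih c hc
    · simp at hc; subst hc; exact digitChar_isDigit _ (Nat.mod_lt _ (by omega))

theorem decDigits_ne_nil (n : Nat) : decDigits n ≠ [] := by
  rw [decDigits]; split <;> simp

theorem myVal_append (acc : Nat) (xs : List Char) (d : Char) :
    myVal acc (xs ++ [d]) = (myVal acc xs) * 10 + (d.toNat - '0'.toNat) := by
  simp [myVal, List.foldl_append]

theorem myVal_decDigits (n : Nat) : myVal 0 (decDigits n) = n := by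
  induction n using decDigits.induct with
  | case1 n h =>
    rw [decDigits, if_pos h]
    have := digitChar_val n h
    simpa [myVal] using this
  | case2 n h ih =>
    rw [decDigits, if_neg h, myVal_append, ih, digitChar_val _ (Nat.mod_lt _ (by omega))]
    omega

theorem toDigitsCore_eq (f : Nat) : ∀ (n : Nat) (l : List Char), n < 10 ^ f → 0 < f →
    Nat.toDigitsCore 10 f n l = decDigits n ++ l := by
  induction f with
  | zero => intro n l _ h; omega
  | succ f ih =>
    intro n l hn _
    rw [Nat.toDigitsCore]
    by_cases h0 : n / 10 = 0
    · have hlt : n < 10 := by omega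
      simp only [h0, if_true]
      rw [decDigits, if_pos hlt, Nat.mod_eq_of_lt hlt]; rfl
    · have hge : 10 ≤ n := by by_contra hc; exact h0 (Nat.div_eq_of_lt (by omega))
      have hf : 0 < f := by
        by_contra hc
        have : f = 0 := by omega
        subst this; simp at hn; omega
      have hdiv : n / 10 < 10 ^ f := by
        rw [Nat.div_lt_iff_lt_mul (by omega)]
        calc n < 10 ^ (f+1) := hn
        _ = 10 ^ f * 10 := by ring
      simp only [h0, if_false]
      rw [ih (n/10) _ hdiv hf]
      rw [show decDigits n = decDigits (n/10) ++ [Nat.digitChar (n % 10)] by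
            rw [decDigits]; rw [if_neg (by omega)]]
      simp

theorem toDigits_eq (n : Nat) : Nat.toDigits 10 n = decDigits n := by
  have h1 : n < 10 ^ (n + 1) := by
    calc n < 10 ^ n := Nat.lt_pow_self (by omega)
    _ ≤ 10 ^ (n+1) := Nat.pow_le_pow_right (by omega) (by omega)
  have := toDigitsCore_eq (n+1) n [] h1 (by omega)
  rw [Nat.toDigits, this, List.append_nil]

theorem strip_eq_self (l : List Char) (h : ∀ c ∈ l, PySem.Int.isIntSpace c = false) :
    (List.dropWhile PySem.Int.isIntSpace
      (List.dropWhile PySem.Int.isIntSpace l).reverse).reverse = l := by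
  rw [dropWhile_false_all l h]
  rw [dropWhile_false_all l.reverse (fun c hc => h c (List.mem_reverse.mp hc))]
  exact List.reverse_reverse l

theorem isIntSpace_of_digit (c : Char) (h : c.isDigit = true) :
    PySem.Int.isIntSpace c = false := by
  simp only [PySem.Int.isIntSpace, Bool.or_eq_false_iff, decide_eq_false_iff_not]
  refine ⟨⟨⟨⟨⟨?_, ?_⟩, ?_⟩, ?_⟩, ?_⟩, ?_⟩ <;> (rintro rfl; simp at h)

theorem myDigitsVal?_decDigits (m : Nat) : myDigitsVal? (decDigits m) = some m := by
  rcases hds : decDigits m with _ | ⟨d, rest⟩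
  · exact absurd hds (decDigits_ne_nil m)
  · show myGo (d :: rest) false 0 = some m
    rw [myGo_digits (d :: rest) false 0
      (by rw [← hds]; exact decDigits_digits m) (Or.inl (by simp))]
    rw [← hds, myVal_decDigits]

theorem ofChars?_toChars (n : Int) : PySem.Int.ofChars? (PySem.Int.toChars n) = some n := by
  rw [ofChars?_eq_clone]
  unfold PySem.Int.toChars myOfChars?
  by_cases hn : n < 0
  · simp only [hn, if_true, toDigits_eq]
    rw [strip_eq_self _ (by
      intro c hc
      rcases List.mem_cons.mp hc with rfl | hc
      · decide
      · exact isIntSpace_of_digit c (decDigits_digits _ c hc))]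
    -- match on '-' :: ds reduces
    conv_lhs => whnf
    rw [myDigitsVal?_decDigits]
    simp
    rw [abs_of_neg hn]; ring
  · simp only [hn, if_false, toDigits_eq]
    rw [strip_eq_self _ (fun c hc => isIntSpace_of_digit c (decDigits_digits _ c hc))]
    rcases hds : decDigits n.toNat with _ | ⟨d, rest⟩
    · exact absurd hds (decDigits_ne_nil _)
    · have hd : d.isDigit = true := decDigits_digits _ d (by rw [hds]; exact List.mem_cons_self)
      split
      · rename_i heq
        exfalso
        injection heq with h1 _
        rw [h1] at hd; simp at hd
      · rename_i heq
        exfalso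
        injection heq with h1 _
        rw [h1] at hd; simp at hd
      · rw [← hds, myDigitsVal?_decDigits]
        simp
        omega


-- the int(str(n)) round trip: pvConcat n 1 = n
theorem pvConcat_one (n : Int) : pvConcat n 1 = n := by
  unfold pvConcat
  simp [ofChars?_toChars]

-- membership characterisations ---------------------------------------------

def Cmb (a b x : Int) : Prop :=
  x = a + b ∨ x = a - b ∨ x = a * b ∨ (b ≠ 0 ∧ x = PySem.Int.floordiv a b)

theorem mem_pvCombine (s : PySem.Set Int) (a b x : Int) :
    x ∈ pvCombine s a b ↔ x ∈ s ∨ Cmb a b x := by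
  unfold pvCombine Cmb
  split_ifs with h <;> simp [PySem.Set.mem_add, h] <;> tauto

theorem mem_foldl_gen {β : Type} (f : PySem.Set Int → β → PySem.Set Int)
    (P : β → Int → Prop) (hf : ∀ s e x, x ∈ f s e ↔ x ∈ s ∨ P e x) :
    ∀ (l : List β) (s0 : PySem.Set Int) (x : Int),
      x ∈ l.foldl f s0 ↔ x ∈ s0 ∨ ∃ e ∈ l, P e x := by
  intro l
  induction l with
  | nil => simp
  | cons e t ih =>
    intro s0 x
    rw [List.foldl_cons, ih, hf, List.exists_mem_cons_iff]
    tauto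

theorem mem_pairs (left right : List Int) (s : PySem.Set Int) (x : Int) :
    x ∈ left.foldl (fun s a => right.foldl (fun s b => pvCombine s a b) s) s ↔
      x ∈ s ∨ ∃ a ∈ left, ∃ b ∈ right, Cmb a b x :=
  mem_foldl_gen _ (fun a x => ∃ b ∈ right, Cmb a b x)
    (fun s a x => mem_foldl_gen _ (fun b x => Cmb a b x)
      (fun s b x => mem_pvCombine s a b x) right s x) left s x

theorem mem_reachB (N x : Int) (count : Nat) :
    x ∈ reachB N count ↔ x = pvConcat N count ∨
      ∃ j, 1 ≤ j ∧ j < count ∧ ∃ a ∈ reachB N j, ∃ b ∈ reachB N (count - j), Cmb a b x := by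
  rw [reachB]
  rw [mem_foldl_gen _
    (fun (jw : {k // k ∈ List.range (count - 1)}) x =>
      ∃ a ∈ reachB N (jw.1 + 1), ∃ b ∈ reachB N (count - (jw.1 + 1)), Cmb a b x)
    (fun s jw x => mem_pairs (reachB N (jw.1 + 1)) (reachB N (count - (jw.1 + 1))) s x)]
  simp only [PySem.Set.mem_add, List.mem_attach, true_and, List.not_mem_nil, false_or]
  constructor
  · rintro (h | ⟨⟨k, hk⟩, h⟩)
    · exact Or.inl h
    · exact Or.inr ⟨k + 1, by omega, by have := List.mem_range.mp hk; omega, h⟩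
  · rintro (h | ⟨j, hj1, hj2, h⟩)
    · exact Or.inl h
    · refine Or.inr ⟨⟨j - 1, List.mem_range.mpr (by omega)⟩, ?_⟩
      have hj : j - 1 + 1 = j := by omega
      simpa [hj] using h

theorem mem_solInner (arr : List (PySem.Set Int)) (i : Nat) (x : Int) :
    x ∈ solInner arr i ↔ x ∈ arr.getD i [] ∨
      ∃ j ∈ List.range i, ∃ a ∈ arr.getD j [], ∃ b ∈ arr.getD (i - j - 1) [], Cmb a b x := by
  unfold solInner
  exact mem_foldl_gen _
    (fun j x => ∃ a ∈ arr.getD j [], ∃ b ∈ arr.getD (i - j - 1) [], Cmb a b x)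
    (fun s j x => mem_pairs _ _ s x) (List.range i) _ x

-- the A-side loop invariant --------------------------------------------------

def InvA (N : Int) (arr : List (PySem.Set Int)) (i : Nat) : Prop :=
  arr.length = 8 ∧ ∀ k, k < 8 →
    (k < i → ∀ x, x ∈ arr.getD k [] ↔ x ∈ reachB N (k + 1)) ∧
    (i ≤ k → arr.getD k [] = [pvConcat N (k + 1)])

theorem reachB_one (N : Int) : reachB N 1 = [pvConcat N 1] := by
  rw [reachB]; rfl

theorem solInner_char (N x : Int) (arr : List (PySem.Set Int)) (i : Nat)
    (hInv : InvA N arr i) (hi : i < 8) :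
    x ∈ solInner arr i ↔ x ∈ reachB N (i + 1) := by
  obtain ⟨hlen, hk⟩ := hInv
  rw [mem_solInner, mem_reachB]
  have hsing : arr.getD i [] = [pvConcat N (i + 1)] := (hk i hi).2 le_rfl
  constructor
  · rintro (h | ⟨j, hj, a, ha, b, hb, hc⟩)
    · rw [hsing] at h; simp at h; exact Or.inl h
    · have hji : j < i := List.mem_range.mp hj
      refine Or.inr ⟨j + 1, by omega, by omega, a, ?_, b, ?_, hc⟩
      · exact ((hk j (by omega)).1 (by omega) a).mp ha
      · have h2 : (i + 1) - (j + 1) = (i - j - 1) + 1 := by omega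
        rw [h2]
        exact ((hk (i - j - 1) (by omega)).1 (by omega) b).mp hb
  · rintro (h | ⟨j, hj1, hj2, a, ha, b, hb, hc⟩)
    · rw [hsing]; simp [h]
    · have hji : j - 1 < i := by omega
      refine Or.inr ⟨j - 1, List.mem_range.mpr hji, a, ?_, b, ?_, hc⟩
      · have h1 : j - 1 + 1 = j := by omega
        exact ((hk (j - 1) (by omega)).1 (by omega) a).mpr (by rwa [h1])
      · have h2 : (i - (j - 1) - 1) + 1 = (i + 1) - j := by omega
        exact ((hk (i - (j - 1) - 1) (by omega)).1 (by omega) b).mpr (by rwa [h2])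

theorem getD_set_self (l : List (PySem.Set Int)) (i : Nat) (s : PySem.Set Int)
    (h : i < l.length) : (l.set i s).getD i [] = s := by
  simp [List.getD, h]

theorem getD_set_ne (l : List (PySem.Set Int)) (i k : Nat) (s : PySem.Set Int)
    (h : i ≠ k) : (l.set i s).getD k [] = l.getD k [] := by
  simp [List.getD, List.getElem?_set_ne h]

theorem loop_eq (N number : Int) : ∀ (n i : Nat) (arr : List (PySem.Set Int)),
    8 - i = n → 1 ≤ i → InvA N arr i →
    solLoop number arr i = altLoop N number (i + 1) := by
  intro n
  induction n with
  | zero =>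
    intro i arr hn _ _
    rw [solLoop, altLoop]
    rw [if_neg (show ¬ i < 8 by omega), if_neg (show ¬ i + 1 < 9 by omega)]
  | succ m ih =>
    intro i arr hn hi hInv
    have hilt : i < 8 := by omega
    rw [solLoop, altLoop, if_pos hilt, if_pos (show i + 1 < 9 by omega)]
    have hchar := solInner_char N number arr i hInv hilt
    by_cases hm : number ∈ reachB N (i + 1)
    · rw [if_pos (hchar.mpr hm), if_pos hm]
      push_cast; ring
    · rw [if_neg (fun hc => hm (hchar.mp hc)), if_neg hm]
      have hInv' : InvA N (arr.set i (solInner arr i)) (i + 1) := by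
        obtain ⟨hlen, hk⟩ := hInv
        refine ⟨by simp [hlen], fun k hk8 => ⟨fun hki x => ?_, fun hik => ?_⟩⟩
        · by_cases hik : k = i
          · subst hik
            rw [getD_set_self _ _ _ (by omega)]
            exact solInner_char N x arr k ⟨hlen, hk⟩ hk8
          · rw [getD_set_ne _ _ _ _ (fun hc => hik hc.symm)]
            exact (hk k hk8).1 (by omega) x
        · rw [getD_set_ne _ _ _ _ (by omega)]
          exact (hk k hk8).2 (by omega)
      have := ih (i + 1) (arr.set i (solInner arr i)) (by omega) (by omega) hInv'
      rw [this]

-- the initial array ----------------------------------------------------------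

theorem arr1_eq (N : Int) :
    (PySem.List.pyRange 1 9 1).foldl
      (fun arr i => arr.set (i - 1).toNat
        (PySem.Set.add (arr.getD (i - 1).toNat []) (pvConcat N i.toNat)))
      (List.replicate 8 ([] : PySem.Set Int)) =
    [[pvConcat N 1], [pvConcat N 2], [pvConcat N 3], [pvConcat N 4],
     [pvConcat N 5], [pvConcat N 6], [pvConcat N 7], [pvConcat N 8]] := by
  rfl

theorem invA_init (N : Int) :
    InvA N [[pvConcat N 1], [pvConcat N 2], [pvConcat N 3], [pvConcat N 4],
           [pvConcat N 5], [pvConcat N 6], [pvConcat N 7], [pvConcat N 8]] 1 := by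
  refine ⟨rfl, fun k hk => ⟨fun hk1 x => ?_, fun h1k => ?_⟩⟩
  · interval_cases k
    · rw [reachB_one]; rfl
  · interval_cases k <;> simp_all

-- ===== VERDICT (by name: the statement is the Claim_ definition above) =====
theorem solution_spec : Claim_equal_solution := by
  intro N number _ _
  unfold Spec_solution solution solution_alt
  by_cases hEq : N == number
  · rw [if_pos hEq]
    have hNn : N = number := by simpa using hEq
    rw [altLoop, if_pos (by omega)]
    rw [if_pos (by rw [reachB_one, pvConcat_one, hNn]; exact List.mem_singleton.mpr rfl)]
    norm_num
  · rw [if_neg hEq]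
    have hNn : N ≠ number := by simpa using hEq
    simp only [arr1_eq]
    rw [loop_eq N number 7 1 _ rfl le_rfl (invA_init N)]
    conv_rhs => rw [altLoop]
    rw [if_pos (show (1:Nat) < 9 by omega)]
    rw [if_neg (by rw [reachB_one, pvConcat_one]; simp; omega)]
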